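-- pv_equiv track=rewrite | github.com/brendanconnelly/Math_Tools_App | app.py | combosoflist
-- ===== SOURCE A (Python) =====
-- from math import floor, tan, pi
--
-- def combosoflist(mylist):
--   retlist = []
--   for i in range(floor(len(mylist) / 2)):
--     quicklist = []
--     quicklist.append(mylist[i])
--     quicklist.append(mylist[len(mylist) - i - 1])
--     retlist.append(quicklist)
--   if len(mylist) % 2 == 1:
--     quicklist = [mylist[floor(len(mylist) / 2)]]
--     quicklist.append(mylist[floor(len(mylist) / 2)])
--     retlist.append(quicklist)
--   return retlist
-- ===== SOURCE B (Python) =====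
-- def combosoflist(mylist):
--   # Consume the list like a deque: walk it forward while popping a shrinking
--   # stack copy from its tail; a countdown of unconsumed elements stops the
--   # loop, and the odd middle pairs with itself when the two ends meet.
--   out = []
--   back = list(mylist)
--   remaining = len(mylist)
--   for first in mylist:
--     if remaining <= 0:
--       break
--     out.append([first, back.pop()])
--     remaining -= 2
--   return out
-- ===== Notes on version B (the rewrite author's own statement) =====
-- stated objective: alternative
-- what changed: Replaces A's index loop over range(n//2) plus a separate odd-length middle branch by a single forward pass that pops a shrinking tail stack (deque-style consumption with a countdown of unconsumed elements); there is no index arithmetic and no parity case, the middle self-pair arises when the two ends meet.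
import Mathlib
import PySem

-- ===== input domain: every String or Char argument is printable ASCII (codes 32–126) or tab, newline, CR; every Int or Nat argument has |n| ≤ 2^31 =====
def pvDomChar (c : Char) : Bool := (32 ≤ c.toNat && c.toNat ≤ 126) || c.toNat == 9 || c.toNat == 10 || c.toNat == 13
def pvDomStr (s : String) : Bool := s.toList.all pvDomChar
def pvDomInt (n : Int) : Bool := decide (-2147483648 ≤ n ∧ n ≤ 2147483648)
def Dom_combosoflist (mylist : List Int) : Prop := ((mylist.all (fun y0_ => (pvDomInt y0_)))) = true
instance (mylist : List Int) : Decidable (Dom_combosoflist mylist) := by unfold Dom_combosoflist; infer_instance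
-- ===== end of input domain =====

-- B replaces A's index loop plus odd-middle branch by one forward pass that pops a
-- shrinking tail stack with a countdown (deque-style consumption, no index arithmetic).


-- ===== PORT A =====
-- floor(len(mylist)/2) is exact as integer division for any list length (the float is exact below 2^53)
def combosoflist (mylist : List Int) : List (List Int) :=
  let n : Int := mylist.length
  let retlist : List (List Int) :=
    (PySem.List.pyRange 0 (PySem.Int.floordiv n 2) 1).foldl
      (fun retlist i =>
        retlist ++ [[PySem.List.pyGetD mylist i 0,
                     PySem.List.pyGetD mylist (n - i - 1) 0]]) []
  if PySem.Int.mod n 2 = 1 then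
    retlist ++ [[PySem.List.pyGetD mylist (PySem.Int.floordiv n 2) 0,
                 PySem.List.pyGetD mylist (PySem.Int.floordiv n 2) 0]]
  else retlist

-- ===== PORT B =====
-- the for-loop with break: a fold over mylist whose state (out, back, remaining) is
-- frozen once remaining ≤ 0 (the break).  back.pop() runs only with remaining > 0,
-- where back is nonempty, so getLastD 0 / dropLast are exact for Python's pop().
def combosoflist_alt (mylist : List Int) : List (List Int) :=
  (mylist.foldl
    (fun (s : List (List Int) × List Int × Int) first =>
      if s.2.2 ≤ 0 then s
      else (s.1 ++ [[first, s.2.1.getLastD 0]], s.2.1.dropLast, s.2.2 - 2))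
    ([], mylist, (mylist.length : Int))).1

-- ===== PRECONDITION & SPEC =====
def Spec_combosoflist (mylist : List Int) (out : List (List Int)) : Prop := out = combosoflist_alt mylist
instance (mylist : List Int) (out : List (List Int)) : Decidable (Spec_combosoflist mylist out) := by unfold Spec_combosoflist; infer_instance

-- ===== CLAIM (what is proved, stated in full; the proofs are below) =====
def Claim_equal_combosoflist : Prop := ∀ (mylist : List Int), Dom_combosoflist mylist → Spec_combosoflist mylist (combosoflist mylist)

-- ===== LEMMAS AND PROOFS =====

-- canonical form: both programs produce [l[i], l[n-1-i]] for i < ceil(n/2)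
def pvCanon (l : List Int) : List (List Int) :=
  (List.range ((l.length + 1) / 2)).map
    (fun i => [l.getD i 0, l.getD (l.length - 1 - i) 0])

lemma combosoflist_eq_canon (l : List Int) : combosoflist l = pvCanon l := by
  unfold combosoflist pvCanon
  have hn : (0:Int) < 2 := by norm_num
  simp only [PySem.List.foldl_append_singleton_eq_map, List.nil_append]
  rw [PySem.Int.floordiv_eq_ediv_of_pos hn, PySem.Int.mod_eq_emod_of_pos hn,
    PySem.List.pyRange_one]
  have hcast : (((l.length : Int)) / 2 - 0).toNat = l.length / 2 := by omega
  rw [hcast]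
  rw [List.map_map]
  have hmap : ∀ i ∈ List.range (l.length / 2),
      ((fun x : Int => [PySem.List.pyGetD l x 0,
          PySem.List.pyGetD l ((l.length : Int) - x - 1) 0]) ∘ (fun k : Nat => (0:Int) + k)) i
      = (fun i : Nat => [l.getD i 0, l.getD (l.length - 1 - i) 0]) i := by
    intro i hi
    simp only [List.mem_range] at hi
    have h1 : (0:Int) + i = ((i : Nat) : Int) := by ring
    have h2 : ((l.length : Int)) - ((i : Nat) : Int) - 1 = ((l.length - 1 - i : Nat) : Int) := by
      omega
    simp only [Function.comp, h1, h2, PySem.List.pyGetD_natCast]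
  rw [List.map_congr_left hmap]
  by_cases hodd : (l.length : Int) % 2 = 1
  · rw [if_pos hodd]
    have hlen : l.length % 2 = 1 := by omega
    have hceil : (l.length + 1) / 2 = l.length / 2 + 1 := by omega
    rw [hceil, List.range_succ, List.map_append]
    congr 1
    have hm : ((l.length : Int)) / 2 = (((l.length / 2 : Nat)) : Int) := by omega
    have hmid : l.length - 1 - l.length / 2 = l.length / 2 := by omega
    rw [hm]
    simp only [List.map_cons, List.map_nil, PySem.List.pyGetD_natCast, hmid]
  · rw [if_neg hodd]
    have hlen : l.length % 2 = 0 := by omega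
    have hceil : (l.length + 1) / 2 = l.length / 2 := by omega
    rw [hceil]

-- pure description of B's loop body applied to a front list, a back stack and a countdown
def pvG (front back : List Int) (rem : Int) : List (List Int) :=
  match front with
  | [] => []
  | first :: front' =>
    if rem ≤ 0 then []
    else [first, back.getLastD 0] :: pvG front' back.dropLast (rem - 2)

lemma pvG_nonpos (front back : List Int) (rem : Int) (h : rem ≤ 0) :
    pvG front back rem = [] := by
  cases front with
  | nil => rfl
  | cons a t => simp [pvG, h]

lemma foldl_eq_pvG (front : List Int) :
    ∀ (out : List (List Int)) (back : List Int) (rem : Int),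
    (front.foldl
      (fun (s : List (List Int) × List Int × Int) first =>
        if s.2.2 ≤ 0 then s
        else (s.1 ++ [[first, s.2.1.getLastD 0]], s.2.1.dropLast, s.2.2 - 2))
      (out, back, rem)).1 = out ++ pvG front back rem := by
  induction front with
  | nil => intro out back rem; simp [pvG]
  | cons a t ih =>
    intro out back rem
    simp only [List.foldl_cons, pvG]
    by_cases h : rem ≤ 0
    · rw [if_pos h, if_pos h, ih, pvG_nonpos t back rem h]
    · rw [if_neg h, if_neg h]
      simp only [ih]
      simp

-- the loop invariant: after k steps the front is l.drop k, the back stack is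
-- l.take (n-k), the countdown is n-2k, and the pairs still to come are those at
-- indices k ≤ i < ceil(n/2)
lemma pvG_canon (l : List Int) : ∀ (m k : Nat), l.length ≤ k + m → k ≤ l.length →
    pvG (l.drop k) (l.take (l.length - k)) ((l.length : Int) - 2 * k)
      = (List.range' k ((l.length + 1) / 2 - k)).map
          (fun i => [l.getD i 0, l.getD (l.length - 1 - i) 0]) := by
  intro m
  induction m with
  | zero =>
    intro k h1 h2
    have hk : k = l.length := by omega
    subst hk
    have hc : (l.length + 1) / 2 - l.length = 0 := by omega
    simp [pvG, hc]
  | succ m ih =>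
    intro k h1 h2
    by_cases hstop : 2 * k ≥ l.length
    · have hr : (l.length : Int) - 2 * k ≤ 0 := by omega
      have hc : (l.length + 1) / 2 - k = 0 := by omega
      rw [pvG_nonpos _ _ _ hr, hc]
      simp
    · simp only [not_le] at hstop
      have hklt : k < l.length := by omega
      have hdrop : l.drop k = l[k] :: l.drop (k + 1) := List.drop_eq_getElem_cons hklt
      rw [hdrop]
      simp only [pvG]
      rw [if_neg (by omega)]
      have hkc : k < (l.length + 1) / 2 := by omega
      have hrange : List.range' k ((l.length + 1) / 2 - k)
          = k :: List.range' (k + 1) ((l.length + 1) / 2 - (k + 1)) := by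
        have h3 : (l.length + 1) / 2 - k = ((l.length + 1) / 2 - (k + 1)) + 1 := by omega
        rw [h3, List.range'_succ]
      rw [hrange, List.map_cons]
      congr 1
      · -- head pair: back's top is l[n-1-k]
        have hlast : (l.take (l.length - k)).getLastD 0 = l.getD (l.length - 1 - k) 0 := by
          rw [List.getLastD_eq_getLast?, List.getLast?_eq_getElem?]
          have hlen : (l.take (l.length - k)).length = l.length - k := by
            simp
          rw [hlen]
          have hidx : l.length - k - 1 = l.length - 1 - k := by omega
          rw [List.getElem?_take_of_lt (by omega), hidx, List.getD_eq_getElem?_getD]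
        rw [hlast, List.getD_eq_getElem _ _ hklt]
      · -- tail: one more step of the invariant
        have hdl : (l.take (l.length - k)).dropLast = l.take (l.length - (k + 1)) := by
          rw [List.dropLast_eq_take, List.take_take]
          congr 1
          simp
          omega
        have hrem : (l.length : Int) - 2 * k - 2 = (l.length : Int) - 2 * ((k + 1 : Nat) : Int) := by
          push_cast; ring
        rw [hdl, hrem, ih (k + 1) (by omega) (by omega)]

lemma combosoflist_alt_eq_canon (l : List Int) : combosoflist_alt l = pvCanon l := by
  unfold combosoflist_alt pvCanon
  rw [foldl_eq_pvG, List.nil_append, List.range_eq_range']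
  have h0 : l.take (l.length - 0) = l := by simp
  have h1 : ((l.length : Int) - 2 * (0 : Nat)) = (l.length : Int) := by push_cast; ring
  have := pvG_canon l l.length 0 (by omega) (by omega)
  rw [h0, h1, List.drop_zero] at this
  simpa using this

-- ===== VERDICT (by name: the statement is the Claim_ definition above) =====
theorem combosoflist_spec : Claim_equal_combosoflist := by
  intro l _
  unfold Spec_combosoflist
  rw [combosoflist_eq_canon, combosoflist_alt_eq_canon]
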